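-- pv_equiv track=rewrite | github.com/SanthoshKannanSP/advent-of-code-2023 | day14/solution.py | part2
-- ===== SOURCE A (Python) =====
-- def cycle(data):
--     for _ in range(4):
--         data = tuple(map("".join, zip(*data)))
--         data = tuple(
--             "#".join(
--                 ["".join(sorted(list(group), reverse=True)) for group in row.split("#")]
--             )
--             for row in data
--         )
--         data = tuple(row[::-1] for row in data)
--
--     return data
--
-- def part2(data):
--     data = tuple(data)
--     visited = set(data)
--     array = [data]
--
--     index = 0
--
--     while True:
--         index += 1
--         data = cycle(data)
--         if data in visited:
--             break
--         visited.add(data)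
--         array.append(data)
--
--     first = array.index(data)
--
--     data = array[(1000000000 - first) % (index - first) + first]
--
--     return sum(row.count("O") * (len(data) - r) for r, row in enumerate(data))
-- ===== SOURCE B (Python) =====
-- def cycle(data):
--     for _ in range(4):
--         data = tuple(map("".join, zip(*data)))
--         data = tuple(
--             "#".join(
--                 ["".join(sorted(list(group), reverse=True)) for group in row.split("#")]
--             )
--             for row in data
--         )
--         data = tuple(row[::-1] for row in data)
--
--     return data
--
-- def part2(data):
--     start = tuple(data)
--     seen = {}
--     state = start
--     index = 0
--     while True:
--         index += 1
--         state = cycle(state)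
--         if state in seen:
--             first = seen[state]
--             break
--         seen[state] = index
--     k = first + (1000000000 - first) % (index - first)
--     g = start
--     for _ in range(k):
--         g = cycle(g)
--     return sum(row.count("O") * (len(g) - r) for r, row in enumerate(g))
-- ===== Notes on version B (the rewrite author's own statement) =====
-- stated objective: alternative
-- what changed: B replaces A's visited-set + stored grid array + list.index linear scan with a single dict mapping each cycled state to its first-occurrence index (one O(1) lookup instead of an inner scan) and recomputes the target grid by re-iterating cycle from the start instead of keeping every intermediate grid in memory.
import Mathlib
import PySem

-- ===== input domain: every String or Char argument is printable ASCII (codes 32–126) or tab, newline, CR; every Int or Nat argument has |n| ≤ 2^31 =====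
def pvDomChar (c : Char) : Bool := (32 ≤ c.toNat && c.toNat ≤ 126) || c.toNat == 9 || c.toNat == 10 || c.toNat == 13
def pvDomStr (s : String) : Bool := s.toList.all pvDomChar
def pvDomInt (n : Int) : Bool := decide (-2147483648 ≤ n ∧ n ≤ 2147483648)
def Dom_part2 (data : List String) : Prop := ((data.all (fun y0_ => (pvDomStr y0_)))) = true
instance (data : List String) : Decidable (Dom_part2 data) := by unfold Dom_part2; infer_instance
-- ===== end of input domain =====

-- B replaces A's visited-set + grid array + list.index scan by a single dict state→index
-- (first repeat found by one O(1) lookup) and re-iterates `cycle` from the start instead of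
-- storing every grid; objective: alternative (lower memory, no inner scan), same asymptotics.

-- ===== PORT A =====
-- shared helper: the Python `cycle` function (used verbatim by both A and B, as in the sources)

-- zip(*data) followed by "".join of each tuple: the truncating transpose of the rows.
def pyZipJoin (rows : List String) : List String :=
  match rows with
  | [] => []
  | r :: rs =>
    let ls := (r :: rs).map String.toList
    -- length of zip(*data) = the minimum row length
    let m := (ls.map List.length).foldl Nat.min r.toList.length
    (List.range m).map (fun i => String.ofList (ls.map (fun s => s.getD i ' ')))
    -- getD's default ' ' is never read: i < m ≤ length of every row

-- "#".join(["".join(sorted(list(group), reverse=True)) for group in row.split("#")])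
def pyTiltRow (row : String) : String :=
  PySem.Str.join "#"
    (((PySem.Str.split? row "#").getD []).map   -- getD guard unreachable: separator "#" ≠ ""
      (fun g => String.ofList (PySem.List.sorted g.toList (fun c => c) true)))

-- one body of `for _ in range(4)`: transpose, tilt each row, then row[::-1]
def pyCycleStep (rows : List String) : List String :=
  let t := pyZipJoin rows
  let s := t.map pyTiltRow
  s.map (fun row => (PySem.Str.slice? row none none (-1)).getD row)  -- getD guard unreachable: step -1 ≠ 0

def pyCycle (rows : List String) : List String :=
  (List.range 4).foldl (fun d _ => pyCycleStep d) rows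

-- sum(row.count("O") * (len(data) - r) for r, row in enumerate(data))
def pyLoad (g : List String) : Int :=
  ((PySem.List.enumerate g 0).map
    (fun p => (PySem.Str.count p.2 "O" : Int) * ((g.length : Int) - p.1))).sum

-- the while-loop of A; fuel is a totality guard only (10^9 bounds `index`, so the
-- Nat subtraction / mod below coincide with Python's int arithmetic)
def loopA (fuel : Nat) (visited : PySem.Set (List String))
    (array : List (List String)) (index : Nat) (data : List String) :
    Option (List (List String) × Nat × List String) :=
  match fuel with
  | 0 => none
  | f + 1 =>
    let index := index + 1
    let data := pyCycle data
    if PySem.Set.contains visited data then some (array, index, data)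
    else loopA f (PySem.Set.add visited data) (array ++ [data]) index data

-- the code after A's while-loop
def postA (r : Option (List (List String) × Nat × List String)) : Int :=
  match r with
  | none => 0                         -- fuel exhausted (loop guard; unreachable for runs ≤ 10^9 steps)
  | some (array, index, d) =>
    let first := (PySem.List.index? array d).getD 0    -- d ∈ array here, so index? is some
    let k := (1000000000 - first) % (index - first) + first
    match PySem.List.pyGet? array (k : Int) with       -- array[k], k provably in range
    | some g => pyLoad g
    | none => 0

def part2 (data : List String) : Int :=
  -- `visited = set(data)` seeds the set with the ROW STRINGS of the grid; in Python a row
  -- (str) never compares equal to a grid (tuple), so the grid-valued part of `visited`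
  -- starts empty — ported exactly as the empty grid-set.
  postA (loopA 1000000000 PySem.Set.empty [data] 0 data)

-- ===== PORT B =====
-- the while-loop of B: one dict mapping each cycled state to the index of its first occurrence
def loopB (fuel : Nat) (seen : PySem.Dict (List String) Nat)
    (index : Nat) (state : List String) : Option (Nat × Nat) :=
  match fuel with
  | 0 => none
  | f + 1 =>
    let index := index + 1
    let state := pyCycle state
    match PySem.Dict.get? seen state with
    | some first => some (first, index)
    | none => loopB f (PySem.Dict.insert seen state index) index state

-- the code after B's loop: jump to the representative index and re-iterate cycle from the start
def postB (x0 : List String) (r : Option (Nat × Nat)) : Int :=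
  match r with
  | none => 0                         -- fuel exhausted (loop guard, as in postA)
  | some (first, index) =>
    let k := first + (1000000000 - first) % (index - first)
    pyLoad ((List.range k).foldl (fun g _ => pyCycle g) x0)

def part2_alt (data : List String) : Int :=
  postB data (loopB 1000000000 PySem.Dict.empty 0 data)

-- ===== PRECONDITION & SPEC =====
def Spec_part2 (data : List String) (out : Int) : Prop := out = part2_alt data
instance (data : List String) (out : Int) : Decidable (Spec_part2 data out) := by unfold Spec_part2; infer_instance

-- ===== CLAIM (what is proved, stated in full; the proofs are below) =====
def Claim_equal_part2 : Prop := ∀ (data : List String), Dom_part2 data → Spec_part2 data (part2 data)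

-- ===== LEMMAS AND PROOFS =====

-- f^[n+p] x = f^[n] x whenever f^[p] x = x
theorem iter_per_add (f : List String → List String) (x : List String) (p n : Nat)
    (h : f^[p] x = x) : f^[n + p] x = f^[n] x := by
  rw [Function.iterate_add_apply, h]

-- full periodicity: f^[n] x = f^[n % p] x whenever f^[p] x = x, 0 < p
theorem iter_mod (f : List String → List String) (x : List String) (p : Nat) (hp : 0 < p)
    (h : f^[p] x = x) : ∀ n, f^[n] x = f^[n % p] x := by
  intro n
  induction n using Nat.strong_induction_on with
  | _ n ih =>
    by_cases hn : n < p
    · rw [Nat.mod_eq_of_lt hn]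
    · have h1 : n = (n - p) + p := by omega
      rw [h1, iter_per_add f x p _ h, ih (n - p) (by omega), Nat.add_mod_right]

theorem foldl_range_iterate (f : List String → List String) (x : List String) (k : Nat) :
    (List.range k).foldl (fun g _ => f g) x = f^[k] x := by
  induction k with
  | zero => rfl
  | succ k ih =>
    rw [List.range_succ, List.foldl_append, ih]
    simp [Function.iterate_succ_apply']

-- the orbit prefix [x1, …, x_index]
def tailOrb (x0 : List String) (index : Nat) : List (List String) :=
  (List.range' 1 index).map (fun j => pyCycle^[j] x0)

theorem tailOrb_zero (x0 : List String) : tailOrb x0 0 = [] := rfl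

theorem tailOrb_succ (x0 : List String) (index : Nat) :
    tailOrb x0 (index + 1) = tailOrb x0 index ++ [pyCycle^[index + 1] x0] := by
  unfold tailOrb
  rw [List.range'_1_concat, List.map_append]
  simp [Nat.add_comm]

theorem length_tailOrb (x0 : List String) (index : Nat) :
    (tailOrb x0 index).length = index := by simp [tailOrb]

-- the full array [x0, x1, …, x_index] is x0 :: tail
theorem array_eq_cons (x0 : List String) (index : Nat) :
    (List.range (index + 1)).map (fun j => pyCycle^[j] x0) = x0 :: tailOrb x0 index := by
  rw [List.range_succ_eq_map]
  simp only [List.map_cons, Function.iterate_zero_apply, List.map_map, tailOrb,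
    List.range'_eq_map_range]
  congr 1
  apply List.map_congr_left
  intro j _
  simp [Function.comp, Nat.succ_eq_add_one, Nat.add_comm]

theorem getElem_tailOrb (x0 : List String) (index j : Nat) (h : j < index) :
    (tailOrb x0 index)[j]'(by rw [length_tailOrb]; exact h) = pyCycle^[j + 1] x0 := by
  simp [tailOrb, List.getElem_range', Nat.add_comm]

theorem pyGet_orbit (x0 : List String) (n k : Nat) (hk : k < n + 1) :
    PySem.List.pyGet? ((List.range (n + 1)).map (fun j => pyCycle^[j] x0)) (k : Int)
      = some (pyCycle^[k] x0) := by
  rw [PySem.List.pyGet?_natCast, List.getElem?_eq_getElem (by simpa using hk)]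
  simp only [List.getElem_map, List.getElem_range]

-- MAIN BISIMULATION: with the stated invariants the two loops (plus their continuations)
-- produce the same integer.
theorem bisim (x0 : List String) (fuel : Nat) :
    ∀ (index : Nat) (visited : PySem.Set (List String)) (seen : PySem.Dict (List String) Nat),
    index + fuel ≤ 1000000000 →
    (∀ x, PySem.Set.contains visited x = true ↔ x ∈ tailOrb x0 index) →
    (∀ x, PySem.Dict.get? seen x =
        (PySem.List.index? (tailOrb x0 index) x).map (fun t => t + 1)) →
    postA (loopA fuel visited ((List.range (index + 1)).map (fun j => pyCycle^[j] x0))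
            index (pyCycle^[index] x0))
      = postB x0 (loopB fuel seen index (pyCycle^[index] x0)) := by
  induction fuel with
  | zero => intro index visited seen _ _ _; rfl
  | succ f ih =>
    intro index visited seen hfuel hv hs
    have hstep : pyCycle (pyCycle^[index] x0) = pyCycle^[index + 1] x0 :=
      (Function.iterate_succ_apply' pyCycle index x0).symm
    simp only [loopA, loopB, hstep]
    by_cases hc : PySem.Set.contains visited (pyCycle^[index + 1] x0) = true
    · -- break: the cycled state has been seen before
      have hmem : pyCycle^[index + 1] x0 ∈ tailOrb x0 index := (hv _).mp hc
      obtain ⟨t, ht⟩ := Option.isSome_iff_exists.mp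
        ((PySem.List.index?_isSome_iff _ _).mpr hmem)
      obtain ⟨htlt, htv, htmin⟩ := PySem.List.getElem_of_index?_eq_some ht
      rw [length_tailOrb] at htlt
      have htv' : pyCycle^[t + 1] x0 = pyCycle^[index + 1] x0 := by
        simpa [tailOrb, List.getElem_range', Nat.add_comm] using htv
      rw [hc, hs, ht]
      simp only [Option.map_some, postA, postB, if_true, foldl_range_iterate]
      by_cases hx : pyCycle^[index + 1] x0 = x0
      · -- the repeated state is the start grid itself: A finds it at position 0,
        -- B at its first occurrence t+1 among the cycled states; the values agree by periodicity
        have hidxA : PySem.List.index?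
            ((List.range (index + 1)).map (fun j => pyCycle^[j] x0)) (pyCycle^[index + 1] x0)
            = some 0 := by
          rw [array_eq_cons, hx, PySem.List.index?_cons_self]
        simp only [hidxA, Option.getD_some, Nat.sub_zero, Nat.add_zero]
        have hper : pyCycle^[t + 1] x0 = x0 := htv'.trans hx
        have hmin' : ∀ j, j < t → pyCycle^[j + 1] x0 ≠ x0 := by
          intro j hj hcon
          exact htmin j hj (by rw [getElem_tailOrb x0 index j (by omega), hx]; exact hcon)
        have hiter := iter_mod pyCycle x0 (t + 1) (Nat.succ_pos t) hper
        have hdvd : (t + 1) ∣ (index + 1) := by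
          have hr : pyCycle^[(index + 1) % (t + 1)] x0 = x0 :=
            (hiter (index + 1)).symm.trans hx
          rcases Nat.eq_zero_or_pos ((index + 1) % (t + 1)) with h0 | hpos
          · exact Nat.dvd_of_mod_eq_zero h0
          · exfalso
            refine hmin' ((index + 1) % (t + 1) - 1) ?_ ?_
            · have h1 : (index + 1) % (t + 1) < t + 1 := Nat.mod_lt _ (by omega); omega
            · rw [show (index + 1) % (t + 1) - 1 + 1 = (index + 1) % (t + 1) from by omega]
              exact hr
        rw [pyGet_orbit x0 index _ (Nat.mod_lt _ (Nat.succ_pos index))]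
        have hdvd2 : (t + 1) ∣ (index + 1 - (t + 1)) := Nat.dvd_sub hdvd dvd_rfl
        rw [hiter (1000000000 % (index + 1)),
          hiter (t + 1 + (1000000000 - (t + 1)) % (index + 1 - (t + 1)))]
        rw [Nat.mod_mod_of_dvd _ hdvd, Nat.add_mod_left, Nat.mod_mod_of_dvd _ hdvd2]
        conv_lhs => rw [show (1000000000 : Nat) = (1000000000 - (t + 1)) + (t + 1) from by omega,
          Nat.add_mod_right]
      · -- generic break: both sides use the first occurrence t+1
        have hidxA : PySem.List.index?
            ((List.range (index + 1)).map (fun j => pyCycle^[j] x0)) (pyCycle^[index + 1] x0)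
            = some (t + 1) := by
          rw [array_eq_cons, PySem.List.index?_cons_of_ne _ (fun h => hx h.symm), ht]
          rfl
        simp only [hidxA, Option.getD_some]
        have hmlt : (1000000000 - (t + 1)) % (index + 1 - (t + 1)) < index + 1 - (t + 1) :=
          Nat.mod_lt _ (by omega)
        rw [pyGet_orbit x0 index _ (by omega), Nat.add_comm]
    · -- continue: new state, both loops recurse
      have hnotmem : pyCycle^[index + 1] x0 ∉ tailOrb x0 index := fun h => hc ((hv _).mpr h)
      have hgetnone : PySem.Dict.get? seen (pyCycle^[index + 1] x0) = none := by
        rw [hs, (PySem.List.index?_eq_none_iff _ _).mpr hnotmem, Option.map_none]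
      simp only [Bool.not_eq_true] at hc
      rw [hc, hgetnone]
      simp only [if_false, Bool.false_eq_true]
      have harr : (List.range (index + 1)).map (fun j => pyCycle^[j] x0) ++ [pyCycle^[index + 1] x0]
          = (List.range (index + 1 + 1)).map (fun j => pyCycle^[j] x0) := by
        rw [List.range_succ (n := index + 1), List.map_append, List.map_singleton]
      rw [harr]
      apply ih (index + 1) _ _ (by omega)
      · intro x
        simp only [PySem.Set.contains_eq_listContains, List.contains_eq_mem, decide_eq_true_eq]
        have := PySem.Set.mem_add visited (pyCycle^[index + 1] x0) x
        rw [tailOrb_succ]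
        constructor
        · intro h
          rcases this.mp h with h' | h'
          · exact List.mem_append_left _ ((hv x).mp (by
              simpa only [PySem.Set.contains_eq_listContains, List.contains_eq_mem,
                decide_eq_true_eq] using h'))
          · exact List.mem_append_right _ (by simp [h'])
        · intro h
          rcases List.mem_append.mp h with h' | h'
          · exact this.mpr (Or.inl (by
              have := (hv x).mpr h'
              simpa only [PySem.Set.contains_eq_listContains, List.contains_eq_mem,
                decide_eq_true_eq] using this))
          · exact this.mpr (Or.inr (by simpa using h'))
      · intro x
        rw [tailOrb_succ]
        by_cases hx : x = pyCycle^[index + 1] x0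
        · subst hx
          rw [PySem.Dict.get?_insert_self,
            PySem.List.index?_append_singleton_self _ _ hnotmem, length_tailOrb]
          rfl
        · rw [PySem.Dict.get?_insert_of_ne _ _ hx, hs]
          by_cases hxt : x ∈ tailOrb x0 index
          · rw [PySem.List.index?_append_of_mem _ hxt]
          · rw [(PySem.List.index?_eq_none_iff _ _).mpr hxt,
              (PySem.List.index?_eq_none_iff _ _).mpr (by
                intro h
                rcases List.mem_append.mp h with h' | h'
                · exact hxt h'
                · exact hx (by simpa using h'))]

-- ===== VERDICT (by name: the statement is the Claim_ definition above) =====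
theorem part2_spec : Claim_equal_part2 := by
  intro data _
  unfold Spec_part2 part2 part2_alt
  have h := bisim data 1000000000 0 PySem.Set.empty PySem.Dict.empty (by omega)
    (by intro x; simp [PySem.Set.contains, PySem.Set.empty, tailOrb])
    (by intro x; simp [PySem.Dict.get?_empty, tailOrb, PySem.List.index?])
  simpa [array_eq_cons, tailOrb_zero] using h
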